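-- pv_equiv track=rewrite | github.com/dneff/adventofcode | python/2024/14/solution2.py | get_adjacent_robots
-- ===== SOURCE A (Python) =====
-- def get_adjacent_robots(
--     robots: list[tuple[tuple[int, int], tuple[int, int]]], max_position: tuple[int, int]
-- ) -> list[int]:
--     """Calculate the number of adjacent robots in each row.
--
--     Args:
--         robots: List of robots, where each robot is ((x, y), (vx, vy))
--         max_position (tuple[int, int]): Maximum x,y coordinates of the grid
--
--     Returns:
--         list[int]: List containing the maximum number of adjacent robots for each row
--     """
--     adjacent_robots = []
--     for y in range(max_position[1]):
--         x_pos = [robot[0][0] for robot in robots if robot[0][1] == y]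
--         x_pos.sort()
--         gaps = [x_pos[i + 1] - x_pos[i] for i in range(len(x_pos) - 1)]
--         # if the gap is 1, then the robots are adjacent
--         # look for consecutive gaps of 1
--         max_adjacent = 0
--         current_adjacent = 0
--         for gap in gaps:
--             if gap == 1:
--                 current_adjacent += 1
--             else:
--                 max_adjacent = max(max_adjacent, current_adjacent)
--                 current_adjacent = 0
--         adjacent_robots.append(max_adjacent)
--     return adjacent_robots
-- ===== SOURCE B (Python) =====
-- def get_adjacent_robots(
--     robots: list[tuple[tuple[int, int], tuple[int, int]]], max_position: tuple[int, int]
-- ) -> list[int]: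
--     """Bucket robots by row once, then compute each row's run count from its bucket.
--
--     Same result as the original, but one pass over the robots instead of a
--     full scan of all robots for every row.
--     """
--     rows: dict[int, list[int]] = {}
--     for (x, y), _v in robots:
--         rows.setdefault(y, []).append(x)
--
--     def row_best(xs: list[int]) -> int:
--         best = 0
--         cur = 0
--         for prev, nxt in zip(xs, xs[1:]):
--             if nxt - prev == 1:
--                 cur += 1
--             else:
--                 best = max(best, cur)
--                 cur = 0
--         return best
--
--     return [row_best(sorted(rows.get(y, []))) for y in range(max_position[1])]
-- ===== Notes on version B (the rewrite author's own statement) =====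
-- stated objective: faster
-- what changed: B buckets the robots by row in one pass over the list and then reads each row's x-coordinates from the bucket, instead of re-scanning the whole robot list once per grid row; the run count per row is computed by pairing each sorted x with its successor rather than building an index-based gap list.
import Mathlib
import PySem

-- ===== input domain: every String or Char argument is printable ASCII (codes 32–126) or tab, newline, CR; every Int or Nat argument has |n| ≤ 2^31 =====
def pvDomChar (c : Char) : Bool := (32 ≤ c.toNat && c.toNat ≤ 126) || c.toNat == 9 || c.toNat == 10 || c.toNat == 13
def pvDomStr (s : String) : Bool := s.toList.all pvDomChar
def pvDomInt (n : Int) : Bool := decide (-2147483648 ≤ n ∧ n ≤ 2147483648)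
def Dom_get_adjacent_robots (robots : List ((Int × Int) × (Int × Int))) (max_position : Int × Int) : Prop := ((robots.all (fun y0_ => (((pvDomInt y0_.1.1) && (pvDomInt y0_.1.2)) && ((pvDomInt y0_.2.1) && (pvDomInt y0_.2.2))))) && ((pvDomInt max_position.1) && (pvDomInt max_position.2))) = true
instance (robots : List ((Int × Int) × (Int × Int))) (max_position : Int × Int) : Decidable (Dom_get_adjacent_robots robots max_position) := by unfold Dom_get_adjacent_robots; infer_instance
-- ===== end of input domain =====

-- B buckets the robots by row in ONE pass (a dict y -> xs) instead of re-scanning all robots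
-- for every grid row, and counts each row's runs by pairing each sorted x with its successor
-- instead of building an index-based gap list; objective: faster.

-- ===== PORT A =====
def get_adjacent_robots (robots : List ((Int × Int) × (Int × Int))) (max_position : Int × Int) : List Int :=
  (PySem.List.pyRange 0 max_position.2 1).foldl (fun adjacent_robots y =>
    let x_pos := (robots.filter (fun robot => robot.1.2 == y)).map (fun robot => robot.1.1)
    let x_pos := PySem.List.sorted x_pos (fun x => x) false
    let gaps := (PySem.List.pyRange 0 ((x_pos.length : Int) - 1) 1).map
      (fun i => PySem.List.pyGetD x_pos (i + 1) 0 - PySem.List.pyGetD x_pos i 0)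
    -- indices i and i+1 are always in range here, so pyGetD's default is never used
    let st := gaps.foldl
      (fun s gap => if gap == 1 then (s.1, s.2 + 1) else (max s.1 s.2, 0))
      ((0 : Int), (0 : Int))
    adjacent_robots ++ [st.1]) []

-- ===== PORT B =====
-- helper row_best of Source B: scan adjacent pairs of the sorted row
def pvRowBest (xs : List Int) : Int :=
  ((xs.zip (PySem.List.slice xs (some 1) none)).foldl
    (fun s p => if p.2 - p.1 == 1 then (s.1, s.2 + 1) else (max s.1 s.2, 0))
    ((0 : Int), (0 : Int))).1

def get_adjacent_robots_alt (robots : List ((Int × Int) × (Int × Int))) (max_position : Int × Int) : List Int :=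
  let rows := robots.foldl (fun d r => d.modify r.1.2 [] (· ++ [r.1.1]))
    (PySem.Dict.empty : PySem.Dict Int (List Int))
  (PySem.List.pyRange 0 max_position.2 1).map
    (fun y => pvRowBest (PySem.List.sorted (rows.getD y []) (fun x => x) false))

-- ===== PRECONDITION & SPEC =====
def Spec_get_adjacent_robots (robots : List ((Int × Int) × (Int × Int))) (max_position : Int × Int) (out : List Int) : Prop := out = get_adjacent_robots_alt robots max_position
instance (robots : List ((Int × Int) × (Int × Int))) (max_position : Int × Int) (out : List Int) : Decidable (Spec_get_adjacent_robots robots max_position out) := by unfold Spec_get_adjacent_robots; infer_instance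

-- ===== CLAIM (what is proved, stated in full; the proofs are below) =====
def Claim_equal_get_adjacent_robots : Prop := ∀ (robots : List ((Int × Int) × (Int × Int))) (max_position : Int × Int), Dom_get_adjacent_robots robots max_position → Spec_get_adjacent_robots robots max_position (get_adjacent_robots robots max_position)

-- ===== LEMMAS AND PROOFS =====

-- the bucket for row y holds exactly the x's of the robots on row y, in list order
lemma pv_bucket_eq (robots : List ((Int × Int) × (Int × Int))) (y : Int) :
    (robots.foldl (fun d r => d.modify r.1.2 [] (· ++ [r.1.1]))
      (PySem.Dict.empty : PySem.Dict Int (List Int))).getD y []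
    = (robots.filter (fun robot => robot.1.2 == y)).map (fun robot => robot.1.1) := by
  have h : robots.foldl (fun d r => d.modify r.1.2 [] (· ++ [r.1.1]))
      (PySem.Dict.empty : PySem.Dict Int (List Int))
    = (robots.map (fun r => (r.1.2, r.1.1))).foldl
        (fun d p => d.modify p.1 [] (· ++ [p.2])) PySem.Dict.empty := by
    rw [List.foldl_map]
  rw [h, PySem.Dict.getD_foldl_modify_append, PySem.Dict.getD_empty]
  rw [List.filter_map, List.map_map]
  rfl

-- A's index-built gap list is the successor-difference list of B
lemma pv_gaps_eq (xs : List Int) :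
    (PySem.List.pyRange 0 ((xs.length : Int) - 1) 1).map
      (fun i => PySem.List.pyGetD xs (i + 1) 0 - PySem.List.pyGetD xs i 0)
    = (xs.zip xs.tail).map (fun p => p.2 - p.1) := by
  rw [PySem.List.pyRange_one, List.map_map]
  apply List.ext_getElem
  · simp [List.length_zip]
  · intro k h1 h2
    simp only [List.getElem_map, List.getElem_range, Function.comp_apply, List.getElem_zip]
    have hk : k + 1 < xs.length := by
      simp [List.length_zip] at h2; omega
    have e1 : (0 : Int) + (k : Int) + 1 = ((k + 1 : Nat) : Int) := by push_cast; ring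
    have e2 : (0 : Int) + (k : Int) = ((k : Nat) : Int) := by ring
    rw [e1, e2, PySem.List.pyGetD_natCast, PySem.List.pyGetD_natCast,
      List.getD_eq_getElem xs 0 hk, List.getD_eq_getElem xs 0 (by omega),
      List.getElem_tail]

-- per-row: A's computation on the row's robots equals B's row_best on its bucket
lemma pv_row_eq (robots : List ((Int × Int) × (Int × Int))) (y : Int) :
    (let x_pos := (robots.filter (fun robot => robot.1.2 == y)).map (fun robot => robot.1.1)
     let x_pos := PySem.List.sorted x_pos (fun x => x) false
     let gaps := (PySem.List.pyRange 0 ((x_pos.length : Int) - 1) 1).map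
       (fun i => PySem.List.pyGetD x_pos (i + 1) 0 - PySem.List.pyGetD x_pos i 0)
     (gaps.foldl (fun s gap => if gap == 1 then (s.1, s.2 + 1) else (max s.1 s.2, 0))
       ((0 : Int), (0 : Int))).1)
    = pvRowBest (PySem.List.sorted
        ((robots.foldl (fun d r => d.modify r.1.2 [] (· ++ [r.1.1]))
          (PySem.Dict.empty : PySem.Dict Int (List Int))).getD y []) (fun x => x) false) := by
  rw [pv_bucket_eq]
  simp only [pvRowBest, PySem.List.slice_from_one]
  rw [pv_gaps_eq, List.foldl_map]

theorem get_adjacent_robots_spec_aux (robots : List ((Int × Int) × (Int × Int))) (max_position : Int × Int) :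
    get_adjacent_robots robots max_position = get_adjacent_robots_alt robots max_position := by
  unfold get_adjacent_robots get_adjacent_robots_alt
  rw [PySem.List.foldl_append_singleton_eq_map]
  simp only [List.nil_append]
  apply List.map_congr_left
  intro y _
  exact pv_row_eq robots y

-- ===== VERDICT (by name: the statement is the Claim_ definition above) =====
theorem get_adjacent_robots_spec : Claim_equal_get_adjacent_robots := by
  intro robots max_position _
  exact get_adjacent_robots_spec_aux robots max_position
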